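-- pv_equiv track=rewrite | github.com/zhancongc/PaperOverview | backend/services/statistics_extractor.py | _summarize_statistics
-- ===== SOURCE A (Python) =====
-- from typing import List, Dict, Optional, Any
--
-- def _summarize_statistics(papers: List[Dict]) -> Dict:
--     """统计数据摘要"""
--     summary = {
--         "or_count": 0,
--         "rr_count": 0,
--         "hr_count": 0,
--         "p_count": 0,
--         "percentage_count": 0,
--         "n_count": 0,
--     }
--
--     for paper in papers:
--         stats = paper.get("statistics", {})
--         if "or" in stats:
--             summary["or_count"] += 1
--         if "rr" in stats:
--             summary["rr_count"] += 1
--         if "hr" in stats: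
--             summary["hr_count"] += 1
--         if "p" in stats or stats.get("p_significant"):
--             summary["p_count"] += 1
--         if "percentage" in stats:
--             summary["percentage_count"] += 1
--         if "n" in stats:
--             summary["n_count"] += 1
--
--     return summary
-- ===== SOURCE B (Python) =====
-- from typing import List, Dict
--
-- def _summarize_statistics(papers: List[Dict]) -> Dict:
--     """Build each count as its own aggregate over papers (one comprehension per key)."""
--     def stats(p):
--         return p.get("statistics", {})
--
--     return {
--         "or_count": sum(1 for p in papers if "or" in stats(p)),
--         "rr_count": sum(1 for p in papers if "rr" in stats(p)),
--         "hr_count": sum(1 for p in papers if "hr" in stats(p)),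
--         "p_count": sum(1 for p in papers if "p" in stats(p) or stats(p).get("p_significant")),
--         "percentage_count": sum(1 for p in papers if "percentage" in stats(p)),
--         "n_count": sum(1 for p in papers if "n" in stats(p)),
--     }
-- ===== Notes on version B (the rewrite author's own statement) =====
-- stated objective: alternative
-- what changed: Replaces the single loop that mutates six counters in a summary dict with six independent per-key aggregates (one generator-sum per statistic type), assembled directly into the returned dict.
import Mathlib
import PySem

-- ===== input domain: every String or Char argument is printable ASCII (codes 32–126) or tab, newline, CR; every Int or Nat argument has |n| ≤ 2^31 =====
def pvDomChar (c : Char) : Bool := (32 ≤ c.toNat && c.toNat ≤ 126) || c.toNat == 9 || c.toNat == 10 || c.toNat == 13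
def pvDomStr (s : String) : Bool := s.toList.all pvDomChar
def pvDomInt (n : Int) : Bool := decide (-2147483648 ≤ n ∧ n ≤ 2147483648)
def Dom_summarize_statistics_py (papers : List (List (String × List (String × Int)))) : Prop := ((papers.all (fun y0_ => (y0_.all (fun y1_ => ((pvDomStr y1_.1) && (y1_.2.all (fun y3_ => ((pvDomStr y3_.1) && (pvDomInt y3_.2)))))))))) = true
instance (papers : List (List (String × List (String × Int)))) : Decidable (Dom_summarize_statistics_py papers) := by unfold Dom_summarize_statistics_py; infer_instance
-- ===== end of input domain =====

-- B builds each of the six counts as its own independent aggregate over papers instead of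
-- mutating six counters in one loop; same cost, different decomposition (objective: alternative).


-- shared Python-dict helpers (first-match association-list lookup, as both Pythons use)
-- paper.get("statistics", {})
def pvStats (paper : List (String × List (String × Int))) : List (String × Int) :=
  (paper.lookup "statistics").getD []

-- "k" in stats
def pvHas (stats : List (String × Int)) (k : String) : Bool :=
  stats.any (fun kv => kv.1 == k)

-- stats.get("p_significant") is truthy
def pvPSig (stats : List (String × Int)) : Bool :=
  match stats.lookup "p_significant" with
  | some v => v != 0
  | none => false

-- ===== PORT A =====
-- A's single loop, mutating six counters (kept as a 6-tuple accumulator; the dict's six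
-- fixed keys are materialised into the result list at the end, in insertion order).
def pvAStep (acc : Int × Int × Int × Int × Int × Int)
    (paper : List (String × List (String × Int))) : Int × Int × Int × Int × Int × Int :=
  let stats := pvStats paper
  let (o, r, h, p, pc, n) := acc
  let o := if pvHas stats "or" then o + 1 else o
  let r := if pvHas stats "rr" then r + 1 else r
  let h := if pvHas stats "hr" then h + 1 else h
  let p := if pvHas stats "p" || pvPSig stats then p + 1 else p
  let pc := if pvHas stats "percentage" then pc + 1 else pc
  let n := if pvHas stats "n" then n + 1 else n
  (o, r, h, p, pc, n)

def summarize_statistics_py (papers : List (List (String × List (String × Int)))) : List (String × Int) :=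
  let (o, r, h, p, pc, n) := papers.foldl pvAStep (0, 0, 0, 0, 0, 0)
  [("or_count", o), ("rr_count", r), ("hr_count", h), ("p_count", p),
   ("percentage_count", pc), ("n_count", n)]

-- ===== PORT B =====
-- one independent count per key
def pvCount (papers : List (List (String × List (String × Int))))
    (f : List (String × Int) → Bool) : Int :=
  (papers.countP (fun paper => f (pvStats paper)) : Nat)

def summarize_statistics_py_alt (papers : List (List (String × List (String × Int)))) : List (String × Int) :=
  [("or_count", pvCount papers (fun s => pvHas s "or")),
   ("rr_count", pvCount papers (fun s => pvHas s "rr")),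
   ("hr_count", pvCount papers (fun s => pvHas s "hr")),
   ("p_count", pvCount papers (fun s => pvHas s "p" || pvPSig s)),
   ("percentage_count", pvCount papers (fun s => pvHas s "percentage")),
   ("n_count", pvCount papers (fun s => pvHas s "n"))]

-- ===== PRECONDITION & SPEC =====
def Spec_summarize_statistics_py (papers : List (List (String × List (String × Int)))) (out : List (String × Int)) : Prop := out = summarize_statistics_py_alt papers
instance (papers : List (List (String × List (String × Int)))) (out : List (String × Int)) : Decidable (Spec_summarize_statistics_py papers out) := by unfold Spec_summarize_statistics_py; infer_instance

-- ===== CLAIM (what is proved, stated in full; the proofs are below) =====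
def Claim_equal_summarize_statistics_py : Prop := ∀ (papers : List (List (String × List (String × Int)))), Dom_summarize_statistics_py papers → Spec_summarize_statistics_py papers (summarize_statistics_py papers)

-- ===== LEMMAS AND PROOFS =====

-- loop invariant: A's fold from an arbitrary accumulator adds B's six counts componentwise
theorem pvFold_eq (papers : List (List (String × List (String × Int))))
    (o r h p pc n : Int) :
    papers.foldl pvAStep (o, r, h, p, pc, n) =
      (o + pvCount papers (fun s => pvHas s "or"),
       r + pvCount papers (fun s => pvHas s "rr"),
       h + pvCount papers (fun s => pvHas s "hr"),
       p + pvCount papers (fun s => pvHas s "p" || pvPSig s),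
       pc + pvCount papers (fun s => pvHas s "percentage"),
       n + pvCount papers (fun s => pvHas s "n")) := by
  induction papers generalizing o r h p pc n with
  | nil => simp [pvCount]
  | cons paper rest ih =>
    simp only [List.foldl_cons, pvAStep, ih]
    simp only [pvCount, List.countP_cons]
    split_ifs <;> simp_all <;> omega

theorem summarize_statistics_py_spec : Claim_equal_summarize_statistics_py := by
  intro papers _
  unfold Spec_summarize_statistics_py summarize_statistics_py summarize_statistics_py_alt
  rw [pvFold_eq]
  simp
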